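-- pv_equiv track=rewrite | github.com/rahulrao6/job-search | src/sources/elite_github.py | _infer_title_from_skills
-- ===== SOURCE A (Python) =====
-- from typing import List, Optional, Dict, Set, Tuple
--
-- def _infer_title_from_skills(skills: List[str]) -> Optional[str]:
--     """Infer likely job title from technical skills"""
--     if not skills:
--         return None
--
--     skill_set = set(s.lower() for s in skills)
--
--     # Title inference rules
--     if any(s in skill_set for s in ['react', 'vue', 'angular', 'javascript']):
--         return "Frontend Developer"
--     elif any(s in skill_set for s in ['python', 'java', 'go', 'rust', 'backend']):
--         return "Backend Developer"
--     elif any(s in skill_set for s in ['docker', 'kubernetes', 'aws', 'devops']):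
--         return "DevOps Engineer"
--     elif any(s in skill_set for s in ['machine learning', 'data science', 'ai']):
--         return "Data Scientist"
--     elif any(s in skill_set for s in ['mobile', 'ios', 'android', 'swift', 'kotlin']):
--         return "Mobile Developer"
--     elif len(skills) >= 5:
--         return "Software Engineer"
--
--     return None
-- ===== SOURCE B (Python) =====
-- # B: inverted index keyword -> (priority, title); ONE pass over the skills keeping the
-- # lowest-priority hit, instead of A's per-rule scans of a skill set. Objective: alternative.
-- _KW_INDEX = {}
-- for _i, (_title, _kws) in enumerate([
--     ("Frontend Developer", ['react', 'vue', 'angular', 'javascript']),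
--     ("Backend Developer", ['python', 'java', 'go', 'rust', 'backend']),
--     ("DevOps Engineer", ['docker', 'kubernetes', 'aws', 'devops']),
--     ("Data Scientist", ['machine learning', 'data science', 'ai']),
--     ("Mobile Developer", ['mobile', 'ios', 'android', 'swift', 'kotlin']),
-- ]):
--     for _kw in _kws:
--         _KW_INDEX[_kw] = (_i, _title)
--
-- def _infer_title_from_skills(skills):
--     best = None
--     for s in skills:
--         hit = _KW_INDEX.get(s.lower())
--         if hit is not None and (best is None or hit[0] < best[0]):
--             best = hit
--     if best is not None:
--         return best[1]
--     return "Software Engineer" if len(skills) >= 5 else None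
-- ===== Notes on version B (the rewrite author's own statement) =====
-- stated objective: alternative
-- what changed: Replaced A's ordered membership tests of each rule's keywords against a set of lowered skills by an inverted index (keyword -> (priority, title)) and a single pass over the skills that keeps the lowest-priority hit; correctness rests on the rule keyword sets being pairwise disjoint, so the minimum matched priority is exactly the first rule A's if/elif chain fires.
import Mathlib
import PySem

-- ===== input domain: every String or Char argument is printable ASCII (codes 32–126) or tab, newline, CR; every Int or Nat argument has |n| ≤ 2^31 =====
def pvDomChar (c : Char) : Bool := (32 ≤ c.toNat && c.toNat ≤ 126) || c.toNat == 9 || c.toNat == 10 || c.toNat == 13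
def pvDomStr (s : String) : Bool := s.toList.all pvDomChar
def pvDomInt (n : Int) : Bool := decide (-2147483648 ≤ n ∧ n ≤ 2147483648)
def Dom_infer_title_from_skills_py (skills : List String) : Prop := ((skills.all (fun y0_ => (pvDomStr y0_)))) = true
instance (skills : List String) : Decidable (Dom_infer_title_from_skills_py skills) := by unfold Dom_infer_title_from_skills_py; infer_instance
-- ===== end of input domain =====

-- B replaces A's per-rule scans of a lowered-skill set by an inverted keyword index and a
-- single pass over the skills keeping the lowest-priority hit; objective: alternative.


-- ===== PORT A =====
def infer_title_from_skills_py (skills : List String) : Option String :=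
  if skills = [] then none
  else
    let skill_set : PySem.Set String := PySem.Set.ofList (skills.map PySem.Str.lower)
    if (["react", "vue", "angular", "javascript"].any fun s => PySem.Set.contains skill_set s) then
      some "Frontend Developer"
    else if (["python", "java", "go", "rust", "backend"].any fun s => PySem.Set.contains skill_set s) then
      some "Backend Developer"
    else if (["docker", "kubernetes", "aws", "devops"].any fun s => PySem.Set.contains skill_set s) then
      some "DevOps Engineer"
    else if (["machine learning", "data science", "ai"].any fun s => PySem.Set.contains skill_set s) then
      some "Data Scientist"
    else if (["mobile", "ios", "android", "swift", "kotlin"].any fun s => PySem.Set.contains skill_set s) then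
      some "Mobile Developer"
    else if 5 ≤ skills.length then
      some "Software Engineer"
    else
      none

-- ===== PORT B =====
-- Source B's module-level rules table and the loop building the inverted index keyword -> (priority, title)
def pvRulesB : List (String × List String) :=
  [("Frontend Developer", ["react", "vue", "angular", "javascript"]),
   ("Backend Developer", ["python", "java", "go", "rust", "backend"]),
   ("DevOps Engineer", ["docker", "kubernetes", "aws", "devops"]),
   ("Data Scientist", ["machine learning", "data science", "ai"]),
   ("Mobile Developer", ["mobile", "ios", "android", "swift", "kotlin"])]

def pvKwIndex : PySem.Dict String (Int × String) :=
  (PySem.List.enumerate pvRulesB).foldl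
    (fun d p => p.2.2.foldl (fun d kw => d.insert kw (p.1, p.2.1)) d)
    PySem.Dict.empty

-- the loop body: hit = _KW_INDEX.get(s.lower()); if hit is not None and (best is None or hit[0] < best[0]): best = hit
def pvStep (best : Option (Int × String)) (s : String) : Option (Int × String) :=
  match PySem.Dict.get? pvKwIndex (PySem.Str.lower s) with
  | some hit =>
      match best with
      | none => some hit
      | some b => if hit.1 < b.1 then some hit else some b
  | none => best

def infer_title_from_skills_py_alt (skills : List String) : Option String :=
  match skills.foldl pvStep none with
  | some b => some b.2
  | none => if 5 ≤ skills.length then some "Software Engineer" else none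

-- ===== PRECONDITION & SPEC =====
def Spec_infer_title_from_skills_py (skills : List String) (out : Option String) : Prop := out = infer_title_from_skills_py_alt skills
instance (skills : List String) (out : Option String) : Decidable (Spec_infer_title_from_skills_py skills out) := by unfold Spec_infer_title_from_skills_py; infer_instance

-- ===== CLAIM (what is proved, stated in full; the proofs are below) =====
def Claim_equal_infer_title_from_skills_py : Prop := ∀ (skills : List String), Dom_infer_title_from_skills_py skills → Spec_infer_title_from_skills_py skills (infer_title_from_skills_py skills)

-- ===== LEMMAS AND PROOFS =====

-- left-biased "keep the smaller priority" combination; pvStep best s = pvMerge best (lookup (lower s))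
def pvMerge (a b : Option (Int × String)) : Option (Int × String) :=
  match a, b with
  | none, b => b
  | a, none => a
  | some p, some q => if q.1 < p.1 then some q else some p

-- the first rule whose boolean fires, as B's (priority, title) value
def pvBestOf (b0 b1 b2 b3 b4 : Bool) : Option (Int × String) :=
  if b0 then some (0, "Frontend Developer")
  else if b1 then some (1, "Backend Developer")
  else if b2 then some (2, "DevOps Engineer")
  else if b3 then some (3, "Data Scientist")
  else if b4 then some (4, "Mobile Developer")
  else none

theorem pvStep_eq (best : Option (Int × String)) (s : String) :
    pvStep best s = pvMerge best (PySem.Dict.get? pvKwIndex (PySem.Str.lower s)) := by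
  unfold pvStep pvMerge
  cases PySem.Dict.get? pvKwIndex (PySem.Str.lower s) <;> cases best <;> rfl

theorem pvMerge_assoc (a b c : Option (Int × String)) :
    pvMerge (pvMerge a b) c = pvMerge a (pvMerge b c) := by
  rcases a with _ | p <;> rcases b with _ | q <;> rcases c with _ | r <;>
    first
      | rfl
      | (by_cases h1 : q.1 < p.1 <;> by_cases h2 : r.1 < q.1 <;> by_cases h3 : r.1 < p.1 <;>
          simp [pvMerge, h1, h2, h3] <;> omega)
      | (by_cases h1 : q.1 < p.1 <;> simp [pvMerge, h1])

theorem pvFoldl_merge (L : List String) (acc : Option (Int × String)) :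
    L.foldl pvStep acc = pvMerge acc (L.foldl pvStep none) := by
  induction L generalizing acc with
  | nil => cases acc <;> rfl
  | cons x L ih =>
      simp only [List.foldl_cons, pvStep_eq]
      rw [ih, ih (pvMerge none _)]
      cases acc <;> simp [pvMerge_assoc] <;> rfl

theorem pvMerge_none_left (b : Option (Int × String)) : pvMerge none b = b := by
  cases b <;> rfl

theorem pvKey (y : String) (b0 b1 b2 b3 b4 : Bool) :
    pvMerge (PySem.Dict.get? pvKwIndex y) (pvBestOf b0 b1 b2 b3 b4)
      = pvBestOf (decide (y ∈ ["react", "vue", "angular", "javascript"]) || b0)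
                 (decide (y ∈ ["python", "java", "go", "rust", "backend"]) || b1)
                 (decide (y ∈ ["docker", "kubernetes", "aws", "devops"]) || b2)
                 (decide (y ∈ ["machine learning", "data science", "ai"]) || b3)
                 (decide (y ∈ ["mobile", "ios", "android", "swift", "kotlin"]) || b4) := by
  by_cases h : y ∈ ["react", "vue", "angular", "javascript", "python", "java", "go", "rust",
      "backend", "docker", "kubernetes", "aws", "devops", "machine learning", "data science",
      "ai", "mobile", "ios", "android", "swift", "kotlin"]
  · simp only [List.mem_cons, List.not_mem_nil, or_false] at h
    rcases h with rfl|rfl|rfl|rfl|rfl|rfl|rfl|rfl|rfl|rfl|rfl|rfl|rfl|rfl|rfl|rfl|rfl|rfl|rfl|rfl|rfl <;>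
      (revert b0 b1 b2 b3 b4; decide)
  · simp only [List.mem_cons, List.not_mem_nil, or_false, not_or] at h
    obtain ⟨h1,h2,h3,h4,h5,h6,h7,h8,h9,h10,h11,h12,h13,h14,h15,h16,h17,h18,h19,h20,h21⟩ := h
    have hk : PySem.Dict.keys pvKwIndex
        = ["react", "vue", "angular", "javascript", "python", "java", "go", "rust", "backend",
           "docker", "kubernetes", "aws", "devops", "machine learning", "data science", "ai",
           "mobile", "ios", "android", "swift", "kotlin"] := by decide
    have hf : PySem.Dict.get? pvKwIndex y = none := by
      rw [PySem.Dict.get?_eq_none_iff_not_mem_keys, hk]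
      simp [h1,h2,h3,h4,h5,h6,h7,h8,h9,h10,h11,h12,h13,h14,h15,h16,h17,h18,h19,h20,h21]
    rw [hf, pvMerge_none_left]
    simp [h1,h2,h3,h4,h5,h6,h7,h8,h9,h10,h11,h12,h13,h14,h15,h16,h17,h18,h19,h20,h21]

-- B's fold, characterised by the five "some lowered skill hits rule i" booleans
theorem pvFold_char (L : List String) :
    L.foldl pvStep none
      = pvBestOf (L.any fun s => decide (PySem.Str.lower s ∈ ["react", "vue", "angular", "javascript"]))
                 (L.any fun s => decide (PySem.Str.lower s ∈ ["python", "java", "go", "rust", "backend"]))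
                 (L.any fun s => decide (PySem.Str.lower s ∈ ["docker", "kubernetes", "aws", "devops"]))
                 (L.any fun s => decide (PySem.Str.lower s ∈ ["machine learning", "data science", "ai"]))
                 (L.any fun s => decide (PySem.Str.lower s ∈ ["mobile", "ios", "android", "swift", "kotlin"])) := by
  induction L with
  | nil => rfl
  | cons x L ih =>
      rw [List.foldl_cons, pvFoldl_merge, ih, pvStep_eq, pvMerge_none_left, pvKey]
      simp [List.any_cons]

-- A's membership test of a keyword list against set(lowered) is the lowered-skill any-test
theorem pv_any_flip (kws skills : List String) :
    (kws.any fun s => PySem.Set.contains (PySem.Set.ofList (skills.map PySem.Str.lower)) s)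
      = (skills.any fun s => decide (PySem.Str.lower s ∈ kws)) := by
  rw [Bool.eq_iff_iff]
  simp only [List.any_eq_true, PySem.Set.contains_iff, PySem.Set.mem_ofList, List.mem_map,
    decide_eq_true_eq]
  constructor
  · rintro ⟨a, h1, s, hs, rfl⟩; exact ⟨s, hs, h1⟩
  · rintro ⟨s, hs, h⟩; exact ⟨PySem.Str.lower s, h, s, hs, rfl⟩

-- ===== VERDICT (by name: the statement is the Claim_ definition above) =====
theorem infer_title_from_skills_py_spec : Claim_equal_infer_title_from_skills_py := by
  intro skills _
  unfold Spec_infer_title_from_skills_py infer_title_from_skills_py infer_title_from_skills_py_alt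
  rw [pvFold_char]
  by_cases h : skills = []
  · subst h; decide
  · simp only [if_neg h, pv_any_flip]
    cases hb0 : (skills.any fun s => decide (PySem.Str.lower s ∈ ["react", "vue", "angular", "javascript"])) <;>
    cases hb1 : (skills.any fun s => decide (PySem.Str.lower s ∈ ["python", "java", "go", "rust", "backend"])) <;>
    cases hb2 : (skills.any fun s => decide (PySem.Str.lower s ∈ ["docker", "kubernetes", "aws", "devops"])) <;>
    cases hb3 : (skills.any fun s => decide (PySem.Str.lower s ∈ ["machine learning", "data science", "ai"])) <;>
    cases hb4 : (skills.any fun s => decide (PySem.Str.lower s ∈ ["mobile", "ios", "android", "swift", "kotlin"])) <;>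
      simp [pvBestOf]
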